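-- pv_equiv track=rewrite | github.com/ernaz100/S-VVAD_Pytorch | src/data/realvad_dataset.py | _get_valid_frame_ranges
-- ===== SOURCE A (Python) =====
-- def _get_valid_frame_ranges(vad_data, bbox_data):
--     """
--     Find continuous ranges of frames where both VAD and bbox data are available.
--     Returns a list of (start_frame, end_frame) tuples.
--     """
--     # Find frames that have both VAD and bbox data
--     valid_frames = sorted(set(vad_data.keys()).intersection(set(bbox_data.keys())))
--
--     if not valid_frames:
--         return []
--
--     ranges = []
--     start = valid_frames[0]
--     prev = start
--
--     for frame in valid_frames[1:]:
--         if frame > prev + 1:  # Gap detected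
--             ranges.append((start, prev))
--             start = frame
--         prev = frame
--
--     # Add the last range
--     ranges.append((start, prev))
--
--     return ranges
-- ===== SOURCE B (Python) =====
-- def _get_valid_frame_ranges(vad_data, bbox_data):
--     """
--     Find continuous ranges of frames where both VAD and bbox data are available.
--     Returns a list of (start_frame, end_frame) tuples.
--     """
--     common = set(vad_data.keys()) & set(bbox_data.keys())
--     starts = sorted(f for f in common if f - 1 not in common)
--     ends = sorted(f for f in common if f + 1 not in common)
--     return list(zip(starts, ends))
-- ===== Notes on version B (the rewrite author's own statement) =====
-- stated objective: alternative
-- what changed: The sequential prev/start gap-detection scan over the sorted frames is replaced by order-free boundary detection on the common set: a frame is a range start iff f-1 is not in the set and a range end iff f+1 is not, and the ranges are the zip of the sorted starts with the sorted ends.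
import Mathlib
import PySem

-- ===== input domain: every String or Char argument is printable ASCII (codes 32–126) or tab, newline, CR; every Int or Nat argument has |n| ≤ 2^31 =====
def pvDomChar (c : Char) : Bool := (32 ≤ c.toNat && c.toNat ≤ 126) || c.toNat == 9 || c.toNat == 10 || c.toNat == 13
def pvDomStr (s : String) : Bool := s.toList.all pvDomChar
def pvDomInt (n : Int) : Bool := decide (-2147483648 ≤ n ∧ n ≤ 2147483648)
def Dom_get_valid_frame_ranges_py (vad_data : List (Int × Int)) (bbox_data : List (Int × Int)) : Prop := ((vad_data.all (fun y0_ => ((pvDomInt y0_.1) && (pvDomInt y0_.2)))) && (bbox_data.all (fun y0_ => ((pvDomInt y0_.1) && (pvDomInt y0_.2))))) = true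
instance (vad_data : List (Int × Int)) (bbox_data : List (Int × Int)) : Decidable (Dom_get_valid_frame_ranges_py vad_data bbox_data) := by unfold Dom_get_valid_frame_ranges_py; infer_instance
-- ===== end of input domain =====

-- B replaces A's sequential prev/start gap-detection scan by order-free boundary
-- detection on the common key set (f starts a range iff f-1 is absent, ends one iff
-- f+1 is absent; ranges = zip of sorted starts with sorted ends); same cost.

-- the common frame set both versions compute: set(vad.keys()) & set(bbox.keys())
def pvCommon (vad_data : List (Int × Int)) (bbox_data : List (Int × Int)) : PySem.Set Int :=
  PySem.Set.inter (PySem.Set.ofList ((PySem.Dict.ofList vad_data).keys))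
                  (PySem.Set.ofList ((PySem.Dict.ofList bbox_data).keys))

-- ===== PORT A =====
-- the for-loop over valid_frames[1:] carrying (start, prev, ranges)
def pvLoopA : Int → Int → List (Int × Int) → List Int → List (Int × Int)
  | start, prev, acc, [] => acc ++ [(start, prev)]
  | start, prev, acc, f :: rest =>
      if f > prev + 1 then pvLoopA f f (acc ++ [(start, prev)]) rest
      else pvLoopA start f acc rest

def get_valid_frame_ranges_py (vad_data : List (Int × Int)) (bbox_data : List (Int × Int)) : List (Int × Int) :=
  match PySem.List.sorted (pvCommon vad_data bbox_data) (fun x => x) false with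
  | [] => []
  | v0 :: rest => pvLoopA v0 v0 [] rest

-- ===== PORT B =====
-- common = set & set; starts = sorted(f for f in common if f-1 not in common);
-- ends = sorted(f for f in common if f+1 not in common); list(zip(starts, ends)).
-- (sorted over a set comprehension: result is independent of set iteration order)
def get_valid_frame_ranges_py_alt (vad_data : List (Int × Int)) (bbox_data : List (Int × Int)) : List (Int × Int) :=
  let common := pvCommon vad_data bbox_data
  let starts := PySem.List.sorted (common.filter (fun f => !(PySem.Set.contains common (f - 1)))) (fun x => x) false
  let ends := PySem.List.sorted (common.filter (fun f => !(PySem.Set.contains common (f + 1)))) (fun x => x) false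
  starts.zip ends

-- ===== PRECONDITION & SPEC =====
def Spec_get_valid_frame_ranges_py (vad_data : List (Int × Int)) (bbox_data : List (Int × Int)) (out : List (Int × Int)) : Prop := out = get_valid_frame_ranges_py_alt vad_data bbox_data
instance (vad_data : List (Int × Int)) (bbox_data : List (Int × Int)) (out : List (Int × Int)) : Decidable (Spec_get_valid_frame_ranges_py vad_data bbox_data out) := by unfold Spec_get_valid_frame_ranges_py; infer_instance

-- ===== CLAIM (what is proved, stated in full; the proofs are below) =====
def Claim_equal_get_valid_frame_ranges_py : Prop := ∀ (vad_data : List (Int × Int)) (bbox_data : List (Int × Int)), Dom_get_valid_frame_ranges_py vad_data bbox_data → Spec_get_valid_frame_ranges_py vad_data bbox_data (get_valid_frame_ranges_py vad_data bbox_data)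

-- ===== LEMMAS AND PROOFS =====

-- reference function: A's loop with the accumulator factored out
def pvRanges : Int → Int → List Int → List (Int × Int)
  | start, prev, [] => [(start, prev)]
  | start, prev, f :: rest =>
      if f > prev + 1 then (start, prev) :: pvRanges f f rest
      else pvRanges start f rest

-- gap starts / gap ends of the tail, relative to the previous element
def pvGS : Int → List Int → List Int
  | _, [] => []
  | p, f :: r => if f > p + 1 then f :: pvGS f r else pvGS f r

def pvGE : Int → List Int → List Int
  | p, [] => [p]
  | p, f :: r => if f > p + 1 then p :: pvGE f r else pvGE f r

theorem pvLoopA_eq (rest : List Int) : ∀ (start prev : Int) (acc : List (Int × Int)),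
    pvLoopA start prev acc rest = acc ++ pvRanges start prev rest := by
  induction rest with
  | nil => intro s p a; simp [pvLoopA, pvRanges]
  | cons f r ih =>
      intro s p a
      simp only [pvLoopA, pvRanges]
      split_ifs with h
      · rw [ih]; simp
      · rw [ih]

-- A's range list is the zip of (start :: gap-starts) with gap-ends
theorem pvRanges_zip (l : List Int) : ∀ (s p : Int),
    pvRanges s p l = (s :: pvGS p l).zip (pvGE p l) := by
  induction l with
  | nil => intro s p; simp [pvRanges, pvGS, pvGE]
  | cons f r ih =>
      intro s p
      simp only [pvRanges, pvGS, pvGE]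
      split_ifs with h
      · rw [ih]; simp [List.zip]
      · rw [ih]

-- in a strictly increasing full list, f-1 ∈ full exactly characterises non-starts
theorem pv_starts_aux (full : List Int) (m : Int → Bool)
    (hm : ∀ x, m x = true ↔ x ∈ full) (hfull : full.Pairwise (· < ·)) :
    ∀ (t : List Int) (q : Int) (pre : List Int), full = pre ++ q :: t →
      t.filter (fun f => !(m (f - 1))) = pvGS q t := by
  intro t
  induction t with
  | nil => intro q pre h; simp [pvGS]
  | cons f r ih =>
      intro q pre hfe
      have hp : (pre ++ q :: f :: r).Pairwise (· < ·) := hfe ▸ hfull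
      rw [List.pairwise_append] at hp
      obtain ⟨_, hqt, hcross⟩ := hp
      rw [List.pairwise_cons] at hqt
      obtain ⟨hqlt, hft⟩ := hqt
      rw [List.pairwise_cons] at hft
      obtain ⟨hflt, _⟩ := hft
      have hqf : q < f := hqlt f (by simp)
      by_cases hgap : f > q + 1
      · have hnm : m (f - 1) = false := by
          rw [← Bool.not_eq_true, hm]
          intro hmem
          rw [hfe] at hmem
          rcases List.mem_append.mp hmem with hpre | hqc
          · have := hcross _ hpre q (by simp); omega
          · rcases List.mem_cons.mp hqc with h1 | h2
            · omega
            · rcases List.mem_cons.mp h2 with h3 | h4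
              · omega
              · have := hflt _ h4; omega
        rw [List.filter_cons, pvGS, if_pos hgap]
        simp only [hnm, Bool.not_false, if_pos]
        rw [ih f (pre ++ [q]) (by simpa using hfe)]
      · have hfq : f = q + 1 := by omega
        have hmm : m (f - 1) = true := by
          rw [hm, hfe]; simp [hfq]
        rw [List.filter_cons, pvGS, if_neg hgap]
        simp only [hmm, Bool.not_true, if_neg, Bool.false_eq_true, not_false_eq_true]
        exact ih f (pre ++ [q]) (by simpa using hfe)

-- in a strictly increasing full list, f+1 ∈ full exactly characterises non-ends
theorem pv_ends_aux (full : List Int) (m : Int → Bool)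
    (hm : ∀ x, m x = true ↔ x ∈ full) (hfull : full.Pairwise (· < ·)) :
    ∀ (t : List Int) (p : Int) (pre : List Int), full = pre ++ p :: t →
      (p :: t).filter (fun f => !(m (f + 1))) = pvGE p t := by
  intro t
  induction t with
  | nil =>
      intro p pre hfe
      have hp : (pre ++ [p]).Pairwise (· < ·) := hfe ▸ hfull
      rw [List.pairwise_append] at hp
      obtain ⟨_, _, hcross⟩ := hp
      have hnm : m (p + 1) = false := by
        rw [← Bool.not_eq_true, hm]
        intro hmem
        rw [hfe] at hmem
        rcases List.mem_append.mp hmem with hpre | hqc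
        · have := hcross _ hpre p (by simp); omega
        · simp only [List.mem_singleton] at hqc; omega
      simp [pvGE, hnm]
  | cons f r ih =>
      intro p pre hfe
      have hp : (pre ++ p :: f :: r).Pairwise (· < ·) := hfe ▸ hfull
      rw [List.pairwise_append] at hp
      obtain ⟨_, hqt, hcross⟩ := hp
      rw [List.pairwise_cons] at hqt
      obtain ⟨hqlt, hft⟩ := hqt
      rw [List.pairwise_cons] at hft
      obtain ⟨hflt, _⟩ := hft
      have hqf : p < f := hqlt f (by simp)
      by_cases hgap : f > p + 1
      · have hnm : m (p + 1) = false := by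
          rw [← Bool.not_eq_true, hm]
          intro hmem
          rw [hfe] at hmem
          rcases List.mem_append.mp hmem with hpre | hqc
          · have := hcross _ hpre p (by simp); omega
          · rcases List.mem_cons.mp hqc with h1 | h2
            · omega
            · rcases List.mem_cons.mp h2 with h3 | h4
              · omega
              · have := hflt _ h4; omega
        rw [List.filter_cons, pvGE, if_pos hgap]
        simp only [hnm, Bool.not_false, if_pos]
        rw [ih f (pre ++ [p]) (by simpa using hfe)]
      · have hfq : f = p + 1 := by omega
        have hmm : m (p + 1) = true := by
          rw [hm, hfe]; simp [← hfq]
        rw [List.filter_cons, pvGE, if_neg hgap]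
        simp only [hmm, Bool.not_true, if_neg, Bool.false_eq_true, not_false_eq_true]
        exact ih f (pre ++ [p]) (by simpa using hfe)

-- sorted of a nodup Int list is strictly increasing
theorem pv_sorted_lt (s : List Int) (h : s.Nodup) :
    (PySem.List.sorted s (fun x => x) false).Pairwise (· < ·) := by
  have hperm := PySem.List.sorted_perm s (fun x : Int => x) false
  have hnd2 : (PySem.List.sorted s (fun x => x) false).Nodup := hperm.symm.nodup h
  have hle : (PySem.List.sorted s (fun x => x) false).Pairwise (fun a b => a ≤ b) :=
    PySem.List.sorted_pairwise s (fun x => x)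
  exact (hle.and hnd2).imp (fun hab => lt_of_le_of_ne hab.1 hab.2)

-- sorting a filtered nodup list = filtering the sorted list
theorem pv_sorted_filter (s : List Int) (h : s.Nodup) (p : Int → Bool) :
    PySem.List.sorted (s.filter p) (fun x => x) false =
      (PySem.List.sorted s (fun x => x) false).filter p := by
  apply PySem.List.sorted_eq_of_perm_of_pairwise_lt
  · exact (PySem.List.sorted_perm s (fun x : Int => x) false).filter p
  · exact (pv_sorted_lt s h).sublist List.filter_sublist

-- ===== VERDICT (by name: the statement is the Claim_ definition above) =====
theorem get_valid_frame_ranges_py_spec : Claim_equal_get_valid_frame_ranges_py := by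
  intro vad_data bbox_data _
  unfold Spec_get_valid_frame_ranges_py get_valid_frame_ranges_py get_valid_frame_ranges_py_alt
  set c := pvCommon vad_data bbox_data with hc
  have hnd : c.Nodup := PySem.Set.nodup_inter _ _ (PySem.Set.nodup_ofList _)
  set vf := PySem.List.sorted c (fun x => x) false with hvf
  have hlt : vf.Pairwise (· < ·) := pv_sorted_lt c hnd
  have hm1 : ∀ x, PySem.Set.contains c x = true ↔ x ∈ vf := by
    intro x
    rw [PySem.Set.contains_iff, hvf, PySem.List.mem_sorted]
  simp only
  rw [pv_sorted_filter c hnd, pv_sorted_filter c hnd, ← hvf]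
  cases hve : vf with
  | nil => simp
  | cons v0 rest =>
      rw [hve] at hlt hm1
      have hv0 : ∀ y ∈ rest, v0 < y := (List.pairwise_cons.mp hlt).1
      -- starts: head v0 survives (v0-1 is below every element), tail is pvGS
      have hstart : (v0 :: rest).filter (fun f => !(PySem.Set.contains c (f - 1))) =
          v0 :: pvGS v0 rest := by
        have hnm : PySem.Set.contains c (v0 - 1) = false := by
          rw [← Bool.not_eq_true, hm1]
          intro hmem
          rcases List.mem_cons.mp hmem with h1 | h2
          · omega
          · have := hv0 _ h2; omega
        rw [List.filter_cons]
        simp only [hnm, Bool.not_false, if_pos]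
        rw [pv_starts_aux (v0 :: rest) _ hm1 hlt rest v0 [] rfl]
      have hend : (v0 :: rest).filter (fun f => !(PySem.Set.contains c (f + 1))) =
          pvGE v0 rest :=
        pv_ends_aux (v0 :: rest) _ hm1 hlt rest v0 [] rfl
      rw [hstart, hend]
      show pvLoopA v0 v0 [] rest = (v0 :: pvGS v0 rest).zip (pvGE v0 rest)
      rw [pvLoopA_eq, pvRanges_zip]
      simp
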